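-- pv_equiv track=rewrite | github.com/andreason21/oxenClaw | sampyclaw/memory/reader.py | _fit_to_chars
-- ===== SOURCE A (Python) =====
-- def _fit_to_chars(lines: list[str], max_chars: int) -> tuple[str, int, bool]:
--     if not lines:
--         return "", 0, False
--     included = len(lines)
--     text = "\n".join(lines)
--     while included > 1 and len(text) > max_chars:
--         included -= 1
--         text = "\n".join(lines[:included])
--     if len(text) <= max_chars:
--         return text, included, False
--     return text[:max_chars], 1, True
-- ===== SOURCE B (Python) =====
-- def _fit_to_chars(lines: list[str], max_chars: int) -> tuple[str, int, bool]:
--     # One forward pass over running joined-prefix lengths; join once at the end.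
--     if not lines:
--         return "", 0, False
--     best = 0
--     cum = -1  # length of "\n".join(lines[:k]) is sum(len)+k-1
--     for i, line in enumerate(lines):
--         cum += len(line) + 1
--         if cum <= max_chars:
--             best = i + 1
--     if best:
--         return "\n".join(lines[:best]), best, False
--     return lines[0][:max_chars], 1, True
-- ===== Notes on version B (the rewrite author's own statement) =====
-- stated objective: faster
-- what changed: Replaces the countdown loop that re-joins the prefix on every iteration with a single forward pass over running prefix lengths (sum of line lengths plus separators), joining exactly once at the end.
import Mathlib
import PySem

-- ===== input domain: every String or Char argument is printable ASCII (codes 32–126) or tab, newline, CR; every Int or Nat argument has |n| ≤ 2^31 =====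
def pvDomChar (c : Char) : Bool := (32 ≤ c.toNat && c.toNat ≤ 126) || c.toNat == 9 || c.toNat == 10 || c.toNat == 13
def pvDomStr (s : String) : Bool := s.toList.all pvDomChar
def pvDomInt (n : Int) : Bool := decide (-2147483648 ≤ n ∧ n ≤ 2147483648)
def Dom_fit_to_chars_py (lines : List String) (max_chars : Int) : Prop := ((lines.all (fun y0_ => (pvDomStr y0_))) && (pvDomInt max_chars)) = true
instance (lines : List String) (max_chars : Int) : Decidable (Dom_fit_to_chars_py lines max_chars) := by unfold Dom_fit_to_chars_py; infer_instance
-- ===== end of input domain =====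

-- B replaces A's countdown loop that re-joins the prefix each iteration with one
-- forward pass over running prefix lengths, joining once at the end (faster).


-- ===== PORT A =====
-- while included > 1 and len(text) > max_chars: included -= 1; text = "\n".join(lines[:included])
def fitLoopA (lines : List String) (max_chars : Int) : Nat → String → String × Nat
  | included, text =>
    if 1 < included ∧ max_chars < PySem.Str.len text then
      fitLoopA lines max_chars (included - 1) (PySem.Str.join "\n" (lines.take (included - 1)))
    else (text, included)
  termination_by included _ => included
  decreasing_by omega

def fit_to_chars_py (lines : List String) (max_chars : Int) : String × Int × Bool :=
  if lines = [] then ("", 0, false)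
  else
    let p := fitLoopA lines max_chars lines.length (PySem.Str.join "\n" lines)
    if PySem.Str.len p.1 ≤ max_chars then (p.1, (p.2 : Int), false)
    else (PySem.Str.slice p.1 none (some max_chars), 1, true)

-- ===== PORT B =====
-- for i, line in enumerate(lines): cum += len(line) + 1; if cum <= max_chars: best = i + 1
def fitScanB (max_chars : Int) : List String → Nat → Int → Nat → Nat
  | [], _, _, best => best
  | l :: rest, i, cum, best =>
    let cum' := cum + PySem.Str.len l + 1
    fitScanB max_chars rest (i + 1) cum' (if cum' ≤ max_chars then i + 1 else best)

def fit_to_chars_py_alt (lines : List String) (max_chars : Int) : String × Int × Bool :=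
  if lines = [] then ("", 0, false)
  else
    let best := fitScanB max_chars lines 0 (-1) 0
    if best ≠ 0 then (PySem.Str.join "\n" (lines.take best), (best : Int), false)
    else (PySem.Str.slice (lines.headD "") none (some max_chars), 1, true)

-- ===== PRECONDITION & SPEC =====
def Spec_fit_to_chars_py (lines : List String) (max_chars : Int) (out : String × Int × Bool) : Prop := out = fit_to_chars_py_alt lines max_chars
instance (lines : List String) (max_chars : Int) (out : String × Int × Bool) : Decidable (Spec_fit_to_chars_py lines max_chars out) := by unfold Spec_fit_to_chars_py; infer_instance

-- ===== CLAIM (what is proved, stated in full; the proofs are below) =====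
def Claim_equal_fit_to_chars_py : Prop := ∀ (lines : List String) (max_chars : Int), Dom_fit_to_chars_py lines max_chars → Spec_fit_to_chars_py lines max_chars (fit_to_chars_py lines max_chars)

-- ===== LEMMAS AND PROOFS =====

-- length of "\n".join(lines[:k]) for 1 ≤ k ≤ lines.length
def lenC (lines : List String) (k : Nat) : Int :=
  ((lines.take k).map PySem.Str.len).sum + (k : Int) - 1

-- largest k ≤ bound with lenC lines k ≤ max_chars (0 if none), computed top-down
def bestOf (lines : List String) (max_chars : Int) : Nat → Nat
  | 0 => 0
  | k + 1 => if lenC lines (k + 1) ≤ max_chars then k + 1 else bestOf lines max_chars k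

lemma len_join (ls : List String) (h : ls ≠ []) :
    PySem.Str.len (PySem.Str.join "\n" ls) = ((ls.map PySem.Str.len).sum + ls.length - 1 : Int) := by
  induction ls with
  | nil => simp at h
  | cons a rest ih =>
    cases rest with
    | nil =>
      have h1 : PySem.Str.join "\n" [a] = a := by
        apply String.toList_inj.mp
        simp [PySem.Str.toList_join, PySem.Chars.join_singleton]
      simp [h1, PySem.Str.len_eq]
    | cons b rest' =>
      have hj : (PySem.Str.join "\n" (a :: b :: rest')).toList
          = a.toList ++ "\n".toList ++ (PySem.Str.join "\n" (b :: rest')).toList := by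
        simp [PySem.Str.toList_join, PySem.Chars.join_cons_cons]
      have ih' := ih (by simp)
      rw [PySem.Str.len_eq] at ih' ⊢
      rw [hj]
      have ha := PySem.Str.len_eq a
      have hsep : ("\n".toList).length = 1 := rfl
      simp only [List.length_append, List.map_cons, List.sum_cons, List.length_cons] at *
      push_cast at *
      omega

lemma join_take_one (l : String) (rest : List String) :
    PySem.Str.join "\n" ((l :: rest).take 1) = l := by
  apply String.toList_inj.mp
  simp [PySem.Str.toList_join, PySem.Chars.join_singleton]

lemma lenC_succ (lines : List String) (i : Nat) (l : String) (rest : List String)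
    (h : lines.drop i = l :: rest) :
    lenC lines (i + 1) = lenC lines i + PySem.Str.len l + 1 := by
  have hget : lines[i]? = some l := by
    have h0 : (lines.drop i)[0]? = lines[i + 0]? := List.getElem?_drop
    rw [h] at h0
    simpa using h0.symm
  have htake : lines.take (i + 1) = lines.take i ++ [l] := by
    rw [List.take_add_one, hget]; simp
  simp [lenC, htake]
  ring

lemma lenC_eq_len_join (lines : List String) (k : Nat) (h1 : 1 ≤ k) (h2 : k ≤ lines.length) :
    PySem.Str.len (PySem.Str.join "\n" (lines.take k)) = lenC lines k := by
  have hne : lines.take k ≠ [] := by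
    apply List.ne_nil_of_length_pos
    rw [List.length_take]
    omega
  rw [len_join _ hne, lenC]
  have hlen : (lines.take k).length = k := by rw [List.length_take]; omega
  rw [hlen]

lemma bestOf_le (lines : List String) (max_chars : Int) :
    ∀ k, bestOf lines max_chars k ≤ k := by
  intro k
  induction k with
  | zero => simp [bestOf]
  | succ k ih =>
    rw [bestOf]
    split_ifs
    · omega
    · omega

lemma bestOf_fits (lines : List String) (max_chars : Int) :
    ∀ k, bestOf lines max_chars k ≠ 0 → lenC lines (bestOf lines max_chars k) ≤ max_chars := by
  intro k
  induction k with
  | zero => simp [bestOf]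
  | succ k ih =>
    intro h
    rw [bestOf] at h ⊢
    split_ifs with hf
    · exact hf
    · rw [if_neg hf] at h
      exact ih h

lemma bestOf_zero_one (lines : List String) (max_chars : Int) :
    ∀ k, 1 ≤ k → bestOf lines max_chars k = 0 → ¬ lenC lines 1 ≤ max_chars := by
  intro k
  induction k with
  | zero => omega
  | succ k ih =>
    intro _ h
    rw [bestOf] at h
    by_cases hf : lenC lines (k + 1) ≤ max_chars
    · rw [if_pos hf] at h
      omega
    · rw [if_neg hf] at h
      by_cases hk : k = 0
      · subst hk
        simpa using hf
      · exact ih (by omega) h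

lemma fitScanB_spec (max_chars : Int) (lines : List String) :
    ∀ (xs : List String) (i : Nat), lines.drop i = xs → i ≤ lines.length →
      fitScanB max_chars xs i (lenC lines i) (bestOf lines max_chars i)
        = bestOf lines max_chars lines.length := by
  intro xs
  induction xs with
  | nil =>
    intro i h hle
    have hge : lines.length ≤ i := by
      have hl := congrArg List.length h
      simp at hl
      omega
    have hi : i = lines.length := by omega
    rw [fitScanB, hi]
  | cons l rest ih =>
    intro i h hle
    have hlt : i < lines.length := by
      by_contra hc
      have : lines.drop i = [] := List.drop_eq_nil_of_le (by omega)
      rw [this] at h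
      simp at h
    have hrest : lines.drop (i + 1) = rest := by
      have ht := congrArg List.tail h
      simpa [List.tail_drop] using ht
    have hcum := lenC_succ lines i l rest h
    rw [fitScanB]
    show fitScanB max_chars rest (i + 1) (lenC lines i + PySem.Str.len l + 1)
        (if lenC lines i + PySem.Str.len l + 1 ≤ max_chars then i + 1 else bestOf lines max_chars i)
        = bestOf lines max_chars lines.length
    rw [← hcum]
    have hbest : (if lenC lines (i + 1) ≤ max_chars then i + 1
        else bestOf lines max_chars i) = bestOf lines max_chars (i + 1) := by
      rw [bestOf]
    rw [hbest]
    exact ih (i + 1) hrest (by omega)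

lemma fitLoopA_spec (lines : List String) (max_chars : Int) :
    ∀ (k : Nat), 1 ≤ k → k ≤ lines.length →
      fitLoopA lines max_chars k (PySem.Str.join "\n" (lines.take k))
        = (PySem.Str.join "\n" (lines.take (max 1 (bestOf lines max_chars k))),
           max 1 (bestOf lines max_chars k)) := by
  intro k
  induction k with
  | zero => omega
  | succ k ih =>
    intro _ hle
    rw [fitLoopA]
    by_cases hfit : lenC lines (k + 1) ≤ max_chars
    · have hlen : ¬ (1 < k + 1 ∧ max_chars < PySem.Str.len (PySem.Str.join "\n" (lines.take (k + 1)))) := by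
        rw [lenC_eq_len_join lines (k + 1) (by omega) hle]
        omega
      rw [if_neg hlen]
      have hb : bestOf lines max_chars (k + 1) = k + 1 := by rw [bestOf, if_pos hfit]
      rw [hb]
      have hm : max 1 (k + 1) = k + 1 := by omega
      rw [hm]
    · have hbo : bestOf lines max_chars (k + 1) = bestOf lines max_chars k := by
        rw [bestOf, if_neg hfit]
      by_cases hk : k = 0
      · subst hk
        have hcond : ¬ (1 < 0 + 1 ∧ max_chars < PySem.Str.len (PySem.Str.join "\n" (lines.take (0 + 1)))) := by
          simp
        rw [if_neg hcond, hbo]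
        simp [bestOf]
      · have hcond : 1 < k + 1 ∧ max_chars < PySem.Str.len (PySem.Str.join "\n" (lines.take (k + 1))) := by
          refine ⟨by omega, ?_⟩
          rw [lenC_eq_len_join lines (k + 1) (by omega) hle]
          omega
        rw [if_pos hcond]
        simp only [Nat.add_sub_cancel]
        rw [ih (by omega) (by omega), hbo]

-- ===== VERDICT (by name: the statement is the Claim_ definition above) =====
theorem fit_to_chars_py_spec : Claim_equal_fit_to_chars_py := by
  intro lines max_chars _hdom
  unfold Spec_fit_to_chars_py fit_to_chars_py fit_to_chars_py_alt
  by_cases hnil : lines = []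
  · simp [hnil]
  · rw [if_neg hnil, if_neg hnil]
    have hlen1 : 1 ≤ lines.length := List.length_pos_of_ne_nil hnil
    have hJ : PySem.Str.join "\n" lines = PySem.Str.join "\n" (lines.take lines.length) := by
      rw [List.take_length]
    have hA := fitLoopA_spec lines max_chars lines.length hlen1 le_rfl
    have hB : fitScanB max_chars lines 0 (-1) 0 = bestOf lines max_chars lines.length := by
      have hs := fitScanB_spec max_chars lines lines 0 (by simp) (by omega)
      have h0 : lenC lines 0 = -1 := by simp [lenC]
      rw [h0] at hs
      simpa [bestOf] using hs
    simp only [hJ, hA, hB]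
    set b := bestOf lines max_chars lines.length with hbdef
    by_cases hb0 : b = 0
    · have hm : max 1 b = 1 := by omega
      have hnofit : ¬ lenC lines 1 ≤ max_chars :=
        bestOf_zero_one lines max_chars lines.length hlen1 (by rw [← hbdef]; exact hb0)
      have hlen : PySem.Str.len (PySem.Str.join "\n" (lines.take 1)) = lenC lines 1 :=
        lenC_eq_len_join lines 1 le_rfl hlen1
      rw [hm]
      rw [if_neg (by rw [hlen]; omega), if_neg (by simpa using hb0)]
      obtain ⟨l, rest, rfl⟩ := List.exists_cons_of_ne_nil hnil
      rw [join_take_one]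
      rfl
    · have hm : max 1 b = b := by
        have := bestOf_le lines max_chars lines.length
        omega
      have hfit : lenC lines b ≤ max_chars := bestOf_fits lines max_chars lines.length hb0
      have hble : b ≤ lines.length := bestOf_le lines max_chars lines.length
      have hlen : PySem.Str.len (PySem.Str.join "\n" (lines.take b)) = lenC lines b :=
        lenC_eq_len_join lines b (by omega) hble
      rw [hm, if_pos (by rw [hlen]; omega), if_pos hb0]
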